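-- pv_equiv track=rewrite | github.com/JeffHer77/Tetris | funciones.py | sombra
-- ===== SOURCE A (Python) =====
-- def sombra(tablero,ini,fin):
--     min = {}
--     valor = 0
--     for i in range(ini,fin+1,1):
--         for j in range(0,len(tablero),1):
--             valor = tablero[j][i]
--             if valor == 1:
--                 min[i] = j
--                 break
--         """ if valor == 0:
--             min[i]= 30 """
--     """ if min == {}:
--         for i in range(ini,fin+1,1):
--             min[i]= 29 """
--     return min
-- ===== SOURCE B (Python) =====
-- def sombra(tablero, ini, fin):
--     # Row-major pass with a first-seen guard, then rebuild in column order.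
--     found = {}
--     for j, fila in enumerate(tablero):
--         for i in range(ini, fin + 1):
--             if i not in found and fila[i] == 1:
--                 found[i] = j
--     return {i: found[i] for i in range(ini, fin + 1) if i in found}
-- ===== Notes on version B (the rewrite author's own statement) =====
-- stated objective: alternative
-- what changed: A scans each column top-down with an inner break; B makes one row-major pass recording each column the first time a 1 is seen (a 'not yet found' guard) and then rebuilds the dict in column order.
import Mathlib
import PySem

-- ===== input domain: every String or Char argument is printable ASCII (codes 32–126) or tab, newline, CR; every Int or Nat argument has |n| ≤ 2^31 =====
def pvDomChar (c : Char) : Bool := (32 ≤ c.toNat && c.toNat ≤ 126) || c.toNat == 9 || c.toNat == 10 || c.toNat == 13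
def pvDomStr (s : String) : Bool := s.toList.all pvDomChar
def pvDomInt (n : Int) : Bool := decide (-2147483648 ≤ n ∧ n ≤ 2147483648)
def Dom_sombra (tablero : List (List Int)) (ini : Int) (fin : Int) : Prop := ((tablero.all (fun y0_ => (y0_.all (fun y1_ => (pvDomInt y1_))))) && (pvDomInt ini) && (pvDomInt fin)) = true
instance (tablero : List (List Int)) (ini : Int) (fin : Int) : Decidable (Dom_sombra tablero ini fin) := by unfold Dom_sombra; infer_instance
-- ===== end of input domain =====

-- B swaps the loop order: one row-major pass with a first-seen guard, then the result is rebuilt in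
-- column order — an alternative decomposition of the same column-top scan (same cost, no speed claim).

-- ===== PORT A =====
-- inner 'for j in range(0, len(tablero), 1): valor = tablero[j][i]; if valor == 1: min[i] = j; break'
-- (structural recursion over the rows with the counter j; pyGet? = none is Python's IndexError,
--  excluded by Pre_sombra, so that branch just stops)
def sombraInner (rows : List (List Int)) (i : Int) (j : Int) (min : PySem.Dict Int Int) :
    PySem.Dict Int Int :=
  match rows with
  | [] => min
  | row :: rest =>
    match PySem.List.pyGet? row i with
    | none => min  -- IndexError in Python; outside Pre_sombra
    | some valor => if valor == 1 then min.insert i j else sombraInner rest i (j + 1) min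

def sombra (tablero : List (List Int)) (ini : Int) (fin : Int) : List (Int × Int) :=
  ((PySem.List.pyRange ini (fin + 1) 1).foldl
      (fun min i => sombraInner tablero i 0 min) PySem.Dict.empty).items

-- ===== PORT B =====
def sombra_alt (tablero : List (List Int)) (ini : Int) (fin : Int) : List (Int × Int) :=
  let found := (PySem.List.enumerate tablero 0).foldl
    (fun found p =>
      (PySem.List.pyRange ini (fin + 1) 1).foldl
        (fun found i =>
          if found.contains i = false ∧ PySem.List.pyGet? p.2 i = some 1 then
            found.insert i p.1
          else found)
        found)
    PySem.Dict.empty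
  -- '{i: found[i] for i in range(ini, fin + 1) if i in found}'
  ((PySem.List.pyRange ini (fin + 1) 1).foldl
      (fun out i =>
        match found.get? i with
        | some j => out.insert i j
        | none => out)
      PySem.Dict.empty).items

-- ===== PRECONDITION & SPEC =====
-- a row "passes" A's inner scan at column i: the index is valid and the cell is not 1
def rowPass (row : List Int) (i : Int) : Bool :=
  decide (PySem.Raise.InRange row.length i) && (PySem.List.pyGet? row i != some 1)

-- Pre_ excludes exactly the inputs on which the Python A raises IndexError: for each scanned column,
-- the first row at which the top-down scan stops (if any) must admit that column index (B raises on
-- exactly the same inputs, its guard reads the same cells).  The two explicit bounds on ini/fin are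
-- implied by the per-column condition at i = ini and i = fin (a column outside the first row's range
-- makes that row the stopping row and it fails InRange), so this is the same condition, written so
-- it also decides quickly when the column range is huge.
def Pre_sombra (tablero : List (List Int)) (ini : Int) (fin : Int) : Prop :=
  fin < ini ∨ tablero = [] ∨
    (-(((tablero.headD []).length : Int)) ≤ ini ∧ fin < ((tablero.headD []).length : Int) ∧
      ∀ i ∈ PySem.List.pyRange ini (fin + 1) 1,
        ∀ row ∈ (tablero.dropWhile (fun r => rowPass r i)).take 1,
          PySem.Raise.InRange row.length i)
instance (tablero : List (List Int)) (ini : Int) (fin : Int) : Decidable (Pre_sombra tablero ini fin) := by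
  unfold Pre_sombra; infer_instance

def pvWitness_sombra : List (List Int) × Int × Int := ([[0, 0], [1, 0], [0, 1]], 0, 1)

def Spec_sombra (tablero : List (List Int)) (ini : Int) (fin : Int) (out : List (Int × Int)) : Prop := out = sombra_alt tablero ini fin
instance (tablero : List (List Int)) (ini : Int) (fin : Int) (out : List (Int × Int)) : Decidable (Spec_sombra tablero ini fin out) := by unfold Spec_sombra; infer_instance

-- ===== CLAIM (what is proved, stated in full; the proofs are below) =====
def Claim_equal_sombra : Prop := ∀ (tablero : List (List Int)) (ini : Int) (fin : Int), Dom_sombra tablero ini fin → Pre_sombra tablero ini fin → Spec_sombra tablero ini fin (sombra tablero ini fin)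

-- ===== LEMMAS AND PROOFS =====

-- first row (top down) whose cell at column i is 1
def predRow (i : Int) (row : List Int) : Bool := PySem.List.pyGet? row i == some 1

theorem sombraInner_eq (rows : List (List Int)) (i : Int) (j : Int) (d : PySem.Dict Int Int)
    (h : ∀ row ∈ (rows.dropWhile (fun r => rowPass r i)).take 1, PySem.Raise.InRange row.length i) :
    sombraInner rows i j d =
      match rows.findIdx? (predRow i) with
      | some k => d.insert i (j + (k : Int))
      | none => d := by
  induction rows generalizing j with
  | nil => simp [sombraInner]
  | cons r rest ih =>
    cases hg : PySem.List.pyGet? r i with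
    | none =>
      exfalso
      have hnr : ¬ PySem.Raise.InRange r.length i := (PySem.List.pyGet?_eq_none_iff r i).mp hg
      have hp : rowPass r i = false := by simp [rowPass, hnr]
      have := h r (by simp [hp])
      exact hnr this
    | some v =>
      by_cases hv : v = 1
      · subst hv
        have hpred : predRow i r = true := by simp [predRow, hg]
        simp [sombraInner, hg, List.findIdx?_cons, hpred]
      · have hin : PySem.Raise.InRange r.length i := by
          by_contra hc
          have h0 := (PySem.List.pyGet?_eq_none_iff r i).mpr hc
          rw [h0] at hg
          cases hg
        have hp : rowPass r i = true := by
          simp [rowPass, hg, hin]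
          exact fun hc => hv (by exact_mod_cast hc)
        have hpred : predRow i r = false := by
          simp [predRow, hg]
          exact fun hc => hv (by exact_mod_cast hc)
        have h' : ∀ row ∈ (rest.dropWhile (fun r => rowPass r i)).take 1,
            PySem.Raise.InRange row.length i := by
          intro row hr
          exact h row (by simpa [List.dropWhile_cons, hp] using hr)
        have hvne : (v == (1 : Int)) = false := by simp [hv]
        rw [show sombraInner (r :: rest) i j d = sombraInner rest i (j + 1) d by
              simp [sombraInner, hg, hvne]]
        rw [ih (j + 1) h', List.findIdx?_cons, hpred]
        cases hk : rest.findIdx? (predRow i) with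
        | none => simp
        | some k => simp; ring_nf

-- the inner column loop of B within one row, pointwise
theorem innerRow_get? (row : List Int) (j : Int) (cols : List Int) (d : PySem.Dict Int Int)
    (i : Int) :
    (cols.foldl
        (fun d i => if d.contains i = false ∧ PySem.List.pyGet? row i = some 1 then d.insert i j else d)
        d).get? i =
      if i ∈ cols ∧ d.contains i = false ∧ PySem.List.pyGet? row i = some 1 then some j
      else d.get? i := by
  induction cols generalizing d with
  | nil => simp
  | cons c rest ih =>
    simp only [List.foldl_cons]
    rw [ih]
    by_cases hci : c = i
    · subst hci
      by_cases hcond : d.contains c = false ∧ PySem.List.pyGet? row c = some 1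
      · rw [if_pos hcond]
        have h1 : (d.insert c j).contains c = true := PySem.Dict.contains_insert_self d c j
        simp [h1, PySem.Dict.get?_insert_self, hcond.1, hcond.2]
      · rw [if_neg hcond, if_neg (fun h => hcond ⟨h.2.1, h.2.2⟩),
          if_neg (fun h => hcond ⟨h.2.1, h.2.2⟩)]
    · have hic : i ≠ c := fun h => hci h.symm
      by_cases hcond : d.contains c = false ∧ PySem.List.pyGet? row c = some 1
      · rw [if_pos hcond]
        have h1 : (d.insert c j).contains i = d.contains i := by
          rw [PySem.Dict.contains_insert]; simp [hic]
        have h2 : (d.insert c j).get? i = d.get? i := PySem.Dict.get?_insert_of_ne d j hic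
        rw [h1, h2]
        simp [List.mem_cons, hic]
      · rw [if_neg hcond]
        simp [List.mem_cons, hic]

-- once a column is recorded, the rest of the row-major pass never changes it
theorem found_preserve (rows : List (List Int)) (s : Int) (cols : List Int)
    (d : PySem.Dict Int Int) (i : Int) (v : Int) (hd : d.get? i = some v) :
    ((PySem.List.enumerate rows s).foldl
        (fun d p =>
          cols.foldl
            (fun d i => if d.contains i = false ∧ PySem.List.pyGet? p.2 i = some 1 then d.insert i p.1 else d)
            d)
        d).get? i = some v := by
  induction rows generalizing s d with
  | nil => simpa [PySem.List.enumerate_nil]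
  | cons r rest ih =>
    rw [PySem.List.enumerate_cons, List.foldl_cons]
    apply ih
    rw [innerRow_get? r s cols d i]
    have : d.contains i = true := by
      rw [PySem.Dict.contains_eq_isSome_get?, hd]; rfl
    simp [this, hd]

-- the row-major pass records, for every scanned column, exactly the topmost filled row
theorem found_get? (rows : List (List Int)) (s : Int) (cols : List Int)
    (d : PySem.Dict Int Int) (i : Int) (hi : i ∈ cols) (hd : d.get? i = none) :
    ((PySem.List.enumerate rows s).foldl
        (fun d p =>
          cols.foldl
            (fun d i => if d.contains i = false ∧ PySem.List.pyGet? p.2 i = some 1 then d.insert i p.1 else d)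
            d)
        d).get? i = (rows.findIdx? (predRow i)).map (fun k => s + (k : Int)) := by
  induction rows generalizing s d with
  | nil => simpa [PySem.List.enumerate_nil]
  | cons r rest ih =>
    rw [PySem.List.enumerate_cons, List.foldl_cons]
    have hcont : d.contains i = false := by
      rw [PySem.Dict.contains_eq_isSome_get?, hd]; rfl
    by_cases hp : PySem.List.pyGet? r i = some 1
    · have hpred : predRow i r = true := by simp [predRow, hp]
      have hrec : (cols.foldl
          (fun d i => if d.contains i = false ∧ PySem.List.pyGet? r i = some 1 then d.insert i s else d)
          d).get? i = some s := by
        rw [innerRow_get?]; simp [hi, hcont, hp]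
      rw [found_preserve rest (s + 1) cols _ i s hrec, List.findIdx?_cons, hpred]
      simp
    · have hpred : predRow i r = false := by simp [predRow, hp]
      have hrec : (cols.foldl
          (fun d i => if d.contains i = false ∧ PySem.List.pyGet? r i = some 1 then d.insert i s else d)
          d).get? i = none := by
        rw [innerRow_get?]; simp [hp, hd]
      rw [ih (s + 1) _ hrec, List.findIdx?_cons, hpred]
      cases rest.findIdx? (predRow i) with
      | none => simp
      | some k => simp; omega

-- folding 'maybe insert (i, f i)' over fresh distinct keys appends the defined entries in order
theorem items_optInsert (f : Int → Option Int) (cols : List Int) (d : PySem.Dict Int Int)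
    (hnd : cols.Nodup) (hfresh : ∀ i ∈ cols, d.contains i = false) :
    (cols.foldl
        (fun d i =>
          match f i with
          | some v => d.insert i v
          | none => d)
        d).items =
      d.items ++ cols.filterMap (fun i => (f i).map (fun v => (i, v))) := by
  induction cols generalizing d with
  | nil => simp
  | cons c rest ih =>
    simp only [List.foldl_cons, List.filterMap_cons]
    cases hf : f c with
    | none =>
      rw [ih d hnd.of_cons (fun i h => hfresh i (List.mem_cons_of_mem c h))]
      simp
    | some v =>
      have hcf : d.contains c = false := hfresh c List.mem_cons_self
      have hfresh' : ∀ i ∈ rest, (d.insert c v).contains i = false := by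
        intro i h
        rw [PySem.Dict.contains_insert]
        have : i ≠ c := fun he => (List.nodup_cons.mp hnd).1 (he ▸ h)
        simp [this, hfresh i (List.mem_cons_of_mem c h)]
      rw [ih (d.insert c v) hnd.of_cons hfresh',
        PySem.Dict.items_insert_of_not_contains d v hcf]
      simp

-- ===== VERDICT (by name: the statement is the Claim_ definition above) =====
theorem sombra_spec : Claim_equal_sombra := by
  intro tablero ini fin _ hpre
  -- the per-column stopping condition, in all three cases of Pre_
  have hP : ∀ i ∈ PySem.List.pyRange ini (fin + 1) 1,
      ∀ row ∈ (tablero.dropWhile (fun r => rowPass r i)).take 1,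
        PySem.Raise.InRange row.length i := by
    rcases hpre with h | h | h
    · intro i hi
      rw [PySem.List.pyRange_one_eq_nil (by omega)] at hi
      cases hi
    · intro i _ row hr
      subst h
      simp at hr
    · exact h.2.2
  unfold Spec_sombra sombra sombra_alt
  have hnd : (PySem.List.pyRange ini (fin + 1) 1).Nodup := PySem.List.nodup_pyRange_one ini (fin + 1)
  -- A's fold, column by column, is the 'maybe insert' fold of the topmost filled row
  have hA : (PySem.List.pyRange ini (fin + 1) 1).foldl
      (fun min i => sombraInner tablero i 0 min) PySem.Dict.empty =
      (PySem.List.pyRange ini (fin + 1) 1).foldl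
        (fun d i =>
          match ((tablero.findIdx? (predRow i)).map (fun k => (0 : Int) + (k : Int))) with
          | some v => d.insert i v
          | none => d)
        PySem.Dict.empty := by
    apply PySem.List.foldl_congr_mem
    intro d i hi
    rw [sombraInner_eq tablero i 0 d (hP i hi)]
    cases tablero.findIdx? (predRow i) <;> simp
  rw [hA]
  rw [items_optInsert _ _ _ hnd (fun i _ => PySem.Dict.contains_empty i)]
  rw [items_optInsert _ _ _ hnd (fun i _ => PySem.Dict.contains_empty i)]
  congr 1
  apply List.filterMap_congr
  intro i hi
  rw [found_get? tablero 0 _ PySem.Dict.empty i hi (PySem.Dict.get?_empty i)]
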